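-- pv_equiv track=rewrite | github.com/lequocgiom/1351046-CS420-Project2 | main.py | HasResolvePair
-- ===== SOURCE A (Python) =====
-- def resolve(x,y):
--     '''
--     check whether the 2 predicates can be resolved
--     :param x:
--     :param y:
--     :return:
--     '''
--     if x == '~' + y or y == '~' + x:
--         return True
--     return False
--
-- def HasResolvePair(KB):
--     for i in range (0,len(KB)):
--         for j in range (0,len(KB)):
--             if j!=i:
--                 for m in range(0,len(KB[i])):
--                     for n in range(0,len(KB[j])):
--                         if resolve(KB[i][m],KB[j][n]):
--                             return True
--     return False
-- ===== SOURCE B (Python) =====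
-- def HasResolvePair(KB):
--     # One pass: count, per literal, how many clauses contain it (clauses deduped),
--     # then a clause i has a resolvable partner for x iff '~'+x occurs in some other clause.
--     sets = [set(c) for c in KB]
--     flat = [lit for s in sets for lit in s]
--     cnt = {}
--     for lit in flat:
--         cnt[lit] = cnt.get(lit, 0) + 1
--     for s in sets:
--         for x in s:
--             c = '~' + x
--             if cnt.get(c, 0) > (1 if c in s else 0):
--                 return True
--     return False
-- ===== Notes on version B (the rewrite author's own statement) =====
-- stated objective: faster
-- what changed: Replaces the quadruple nested loop over clause pairs and literal pairs with a single counting pass: a hash map counts in how many (deduplicated) clauses each literal occurs, and a second pass checks per literal whether its complement occurs in a different clause.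
import Mathlib
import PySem

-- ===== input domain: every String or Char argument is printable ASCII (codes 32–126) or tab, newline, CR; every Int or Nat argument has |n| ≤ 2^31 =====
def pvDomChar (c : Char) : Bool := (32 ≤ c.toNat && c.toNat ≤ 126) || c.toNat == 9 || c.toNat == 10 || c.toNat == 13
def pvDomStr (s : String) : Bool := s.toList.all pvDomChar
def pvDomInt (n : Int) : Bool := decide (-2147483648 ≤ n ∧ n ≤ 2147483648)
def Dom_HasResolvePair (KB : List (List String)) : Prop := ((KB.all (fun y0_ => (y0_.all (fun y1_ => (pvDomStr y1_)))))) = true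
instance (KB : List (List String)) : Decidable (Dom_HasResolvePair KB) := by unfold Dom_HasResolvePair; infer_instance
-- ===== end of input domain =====

-- B replaces A's quadruple nested loop over clause pairs with one counting pass
-- (literal -> number of clauses containing it, clauses deduplicated) plus a
-- per-literal complement lookup; a different, asymptotically better algorithm.

-- ===== PORT A =====
def resolve (x y : String) : Bool :=
  if x == "~" ++ y || y == "~" ++ x then true else false

def HasResolvePair (KB : List (List String)) : Bool :=
  (PySem.List.pyRange 0 (KB.length : Int) 1).any fun i =>
    (PySem.List.pyRange 0 (KB.length : Int) 1).any fun j =>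
      j != i &&
        ((PySem.List.pyRange 0 ((PySem.List.pyGetD KB i []).length : Int) 1).any fun m =>
          (PySem.List.pyRange 0 ((PySem.List.pyGetD KB j []).length : Int) 1).any fun n =>
            resolve (PySem.List.pyGetD (PySem.List.pyGetD KB i []) m "")
                    (PySem.List.pyGetD (PySem.List.pyGetD KB j []) n ""))

-- ===== PORT B =====
def HasResolvePair_alt (KB : List (List String)) : Bool :=
  let sets : List (PySem.Set String) := KB.map (fun c => PySem.Set.ofList c)
  let flat : List String := sets.flatMap (fun s => s)
  let cnt : PySem.Dict String Int :=
    flat.foldl (fun d lit => d.insert lit (d.getD lit 0 + 1)) PySem.Dict.empty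
  sets.any fun s => s.any fun x =>
    decide (cnt.getD ("~" ++ x) 0 > (if PySem.Set.contains s ("~" ++ x) then 1 else 0))

-- ===== PRECONDITION & SPEC =====
def Spec_HasResolvePair (KB : List (List String)) (out : Bool) : Prop := out = HasResolvePair_alt KB
instance (KB : List (List String)) (out : Bool) : Decidable (Spec_HasResolvePair KB out) := by unfold Spec_HasResolvePair; infer_instance

-- ===== CLAIM (what is proved, stated in full; the proofs are below) =====
def Claim_equal_HasResolvePair : Prop := ∀ (KB : List (List String)), Dom_HasResolvePair KB → Spec_HasResolvePair KB (HasResolvePair KB)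

-- ===== LEMMAS AND PROOFS =====

-- Both programs decide the same property: some clause i contains a literal x whose
-- complement "~" ++ x occurs in a clause with a different index j.
def GoodPair (KB : List (List String)) : Prop :=
  ∃ (i j : Nat) (hi : i < KB.length) (hj : j < KB.length),
    j ≠ i ∧ ∃ x ∈ KB[i], ("~" ++ x) ∈ KB[j]

theorem resolve_eq (x y : String) : (resolve x y = true) ↔ (x = "~" ++ y ∨ y = "~" ++ x) := by
  simp [resolve]

theorem A_iff (KB : List (List String)) : HasResolvePair KB = true ↔ GoodPair KB := by
  unfold HasResolvePair
  simp only [List.any_eq_true, PySem.List.mem_pyRange_one, bne_iff_ne, Bool.and_eq_true,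
    resolve_eq]
  constructor
  · rintro ⟨i, ⟨hi0, hin⟩, j, ⟨hj0, hjn⟩, hne, m, hm, k, hk, hr⟩
    rw [PySem.List.pyGetD_eq_getElem KB _ hi0 hin] at hm hr
    rw [PySem.List.pyGetD_eq_getElem KB _ hj0 hjn] at hk hr
    rw [PySem.List.pyGetD_eq_getElem _ _ hm.1 hm.2] at hr
    rw [PySem.List.pyGetD_eq_getElem _ _ hk.1 hk.2] at hr
    rcases hr with h | h
    · exact ⟨j.toNat, i.toNat, by omega, by omega, by omega, _, List.getElem_mem _,
        h ▸ List.getElem_mem _⟩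
    · exact ⟨i.toNat, j.toNat, by omega, by omega, by omega, _, List.getElem_mem _,
        h ▸ List.getElem_mem _⟩
  · rintro ⟨i, j, hi, hj, hne, x, hx, hc⟩
    obtain ⟨m, hm, hxm⟩ := List.mem_iff_getElem.mp hx
    obtain ⟨k, hk, hck⟩ := List.mem_iff_getElem.mp hc
    refine ⟨(i : Int), ⟨by omega, by omega⟩, (j : Int), ⟨by omega, by omega⟩, by omega,
      (m : Int), ?_, (k : Int), ?_, Or.inr ?_⟩
    · rw [PySem.List.pyGetD_eq_getElem KB _ (by omega) (by omega)]
      simpa using hm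
    · rw [PySem.List.pyGetD_eq_getElem KB _ (by omega) (by omega)]
      simpa using hk
    · rw [PySem.List.pyGetD_eq_getElem KB _ (by omega) (by omega),
        PySem.List.pyGetD_eq_getElem KB _ (by omega) (by omega),
        PySem.List.pyGetD_eq_getElem _ _ (by omega) (by simpa using hk),
        PySem.List.pyGetD_eq_getElem _ _ (by omega) (by simpa using hm)]
      simp only [Int.toNat_natCast]
      rw [hxm, hck]

-- countP L P exceeds the contribution of position i iff some other position satisfies P
theorem countP_gt_iff {α} (L : List α) (P : α → Bool) :
    ∀ (i : Nat) (hi : i < L.length),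
      ((if P L[i] then 1 else 0) < L.countP P ↔ ∃ j, ∃ hj : j < L.length, j ≠ i ∧ P L[j] = true) := by
  induction L with
  | nil => intro i hi; simp at hi
  | cons a T ih =>
    intro i hi
    cases i with
    | zero =>
      simp only [List.getElem_cons_zero, List.countP_cons, List.length_cons]
      constructor
      · intro h
        have h' : ∃ x ∈ T, P x = true := by
          by_cases ha : P a = true <;> simp [ha] at h <;> exact h
        obtain ⟨x, hx, hPx⟩ := h'
        obtain ⟨j, hj, rfl⟩ := List.mem_iff_getElem.mp hx
        exact ⟨j + 1, by omega, by omega, by simpa using hPx⟩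
      · rintro ⟨j, hj, hne, hPj⟩
        cases j with
        | zero => omega
        | succ j =>
          have h' : ∃ x ∈ T, P x = true := ⟨T[j], List.getElem_mem _, by simpa using hPj⟩
          by_cases ha : P a = true <;> simp [ha] <;> exact h'
    | succ i =>
      have hiT : i < T.length := by simpa using hi
      simp only [List.getElem_cons_succ, List.countP_cons, List.length_cons]
      constructor
      · intro h
        by_cases ha : P a = true
        · exact ⟨0, by omega, by omega, by simpa using ha⟩
        · simp only [ha, Bool.false_eq_true, if_false, Nat.add_zero] at h
          obtain ⟨j, hj, hne, hPj⟩ := (ih i hiT).mp h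
          exact ⟨j + 1, by omega, by omega, by simpa using hPj⟩
      · rintro ⟨j, hj, hne, hPj⟩
        cases j with
        | zero =>
          have ha : P a = true := by simpa using hPj
          have hle : (if P T[i] then 1 else 0) ≤ T.countP P := by
            by_cases h : P T[i] = true
            · simpa [h] using List.countP_pos_iff.mpr ⟨T[i], List.getElem_mem _, h⟩
            · simp [h]
          simpa [ha] using Nat.lt_succ_of_le hle
        | succ j =>
          have hlt := (ih i hiT).mpr ⟨j, by omega, by omega, by simpa using hPj⟩
          exact Nat.lt_of_lt_of_le hlt (Nat.le_add_right _ _)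

-- c occurs in the flattened deduplicated clauses once per clause containing it
theorem count_flat (KB : List (List String)) (c : String) :
    ((KB.map (fun cl => PySem.Set.ofList cl)).flatMap (fun s => s)).count c
      = KB.countP (fun cl => decide (c ∈ cl)) := by
  induction KB with
  | nil => rfl
  | cons hd tl ih =>
    simp only [List.map_cons, List.flatMap_cons, List.count_append, List.countP_cons, ih]
    rw [List.Nodup.count (PySem.Set.nodup_ofList (α := String) hd)]
    by_cases h : c ∈ hd <;> simp [PySem.Set.mem_ofList, h, Nat.add_comm]

theorem B_iff (KB : List (List String)) : HasResolvePair_alt KB = true ↔ GoodPair KB := by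
  unfold HasResolvePair_alt
  simp only [PySem.Dict.foldl_insert_getD_add_one_eq_counter, PySem.Dict.getD_counter,
    List.any_eq_true, decide_eq_true_eq, List.mem_map, count_flat]
  constructor
  · rintro ⟨s, ⟨cl, hcl, rfl⟩, x, hx, hgt⟩
    rw [PySem.Set.mem_ofList] at hx
    obtain ⟨i, hi, rfl⟩ := List.mem_iff_getElem.mp hcl
    have key : (if (fun cl => decide (("~" ++ x) ∈ cl)) KB[i] = true then 1 else 0)
        < KB.countP (fun cl => decide (("~" ++ x) ∈ cl)) := by
      by_cases hm : ("~" ++ x) ∈ KB[i] <;>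
        simp [hm, PySem.Set.contains] at hgt ⊢ <;> omega
    obtain ⟨j, hj, hne, hPj⟩ := (countP_gt_iff KB (fun cl => decide (("~" ++ x) ∈ cl)) i hi).mp key
    exact ⟨i, j, hi, hj, hne, x, hx, by simpa using hPj⟩
  · rintro ⟨i, j, hi, hj, hne, x, hx, hc⟩
    have key := (countP_gt_iff KB (fun cl => decide (("~" ++ x) ∈ cl)) i hi).mpr
      ⟨j, hj, hne, by simpa using hc⟩
    refine ⟨PySem.Set.ofList KB[i], ⟨KB[i], List.getElem_mem _, rfl⟩, x,
      (PySem.Set.mem_ofList _ _).mpr hx, ?_⟩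
    by_cases hm : ("~" ++ x) ∈ KB[i] <;>
      simp [hm, PySem.Set.contains] at key ⊢ <;> omega

-- ===== VERDICT (by name: the statement is the Claim_ definition above) =====
theorem HasResolvePair_spec : Claim_equal_HasResolvePair := by
  intro KB _
  unfold Spec_HasResolvePair
  rw [Bool.eq_iff_iff, A_iff, B_iff]
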